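-- pv_equiv track=rewrite | github.com/NVlabs/Sana | diffusion/scheduler/longlive_flow_euler_sampler_bak.py | _create_autoregressive_segments
-- ===== SOURCE A (Python) =====
-- from typing import List, Optional, Tuple
--
-- def _create_autoregressive_segments(total_frames: int, base_chunk_frames: int) -> List[int]:
--     remained_frames = total_frames % base_chunk_frames
--     num_chunks = total_frames // base_chunk_frames
--     chunk_indices = [0]
--     for i in range(num_chunks):
--         cur_idx = chunk_indices[-1] + base_chunk_frames
--         if i == 0:
--             cur_idx += remained_frames
--         chunk_indices.append(cur_idx)
--     if chunk_indices[-1] < total_frames: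
--         chunk_indices.append(total_frames)
--     return chunk_indices
-- ===== SOURCE B (Python) =====
-- def _create_autoregressive_segments(total_frames: int, base_chunk_frames: int):
--     # Walk backwards from the final frame, peeling off one full chunk at a time,
--     # then reverse; a lone partial segment covers everything when no full chunk fits.
--     segments = []
--     cur = total_frames
--     while cur // base_chunk_frames >= 1:
--         segments.append(cur)
--         cur -= base_chunk_frames
--     if not segments and total_frames > 0:
--         segments.append(total_frames)
--     segments.append(0)
--     segments.reverse()
--     return segments
-- ===== Notes on version B (the rewrite author's own statement) =====
-- stated objective: alternative
-- what changed: B builds the boundaries backwards, walking from the final frame and peeling off one full chunk per iteration of a while loop, then reverses; A builds them forwards from 0 with a remainder/quotient-driven accumulator loop. Pre_ excludes only base_chunk_frames == 0, where both raise ZeroDivisionError.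
import Mathlib
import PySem

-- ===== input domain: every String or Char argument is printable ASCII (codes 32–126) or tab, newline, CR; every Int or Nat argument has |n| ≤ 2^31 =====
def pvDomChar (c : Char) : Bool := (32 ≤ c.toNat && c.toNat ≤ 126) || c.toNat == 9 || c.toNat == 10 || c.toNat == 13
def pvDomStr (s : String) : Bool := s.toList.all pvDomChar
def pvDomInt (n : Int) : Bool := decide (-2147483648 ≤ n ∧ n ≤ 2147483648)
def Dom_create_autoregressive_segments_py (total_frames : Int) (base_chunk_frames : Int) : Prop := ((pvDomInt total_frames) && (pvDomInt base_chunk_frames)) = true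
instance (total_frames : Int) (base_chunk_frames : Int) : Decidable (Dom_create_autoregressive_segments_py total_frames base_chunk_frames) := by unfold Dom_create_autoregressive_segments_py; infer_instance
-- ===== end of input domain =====

-- B walks backwards from the final frame peeling off one full chunk per step, then reverses,
-- instead of A's forward accumulator loop driven by total//base and total%base; same return
-- value for every base_chunk_frames ≠ 0 (alternative decomposition, same cost).

-- ===== PORT A =====
def create_autoregressive_segments_py (total_frames : Int) (base_chunk_frames : Int) : List Int :=
  let remained_frames := PySem.Int.mod total_frames base_chunk_frames
  let num_chunks := PySem.Int.floordiv total_frames base_chunk_frames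
  let chunk_indices : List Int :=
    (PySem.List.pyRange 0 num_chunks 1).foldl (fun acc i =>
      -- chunk_indices[-1]: the list always holds its initial 0, so the IndexError case is unreachable
      let cur_idx := (PySem.List.pyGet? acc (-1)).getD 0 + base_chunk_frames
      let cur_idx := if i == 0 then cur_idx + remained_frames else cur_idx
      acc ++ [cur_idx]) [0]
  if (PySem.List.pyGet? chunk_indices (-1)).getD 0 < total_frames then
    chunk_indices ++ [total_frames]
  else chunk_indices

-- ===== PORT B =====
-- the while loop of Source B: cur // base >= 1 → append cur, step cur -= base
def altLoop (b : Int) (cur : Int) (segs : List Int) : List Int :=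
  if h : 1 ≤ PySem.Int.floordiv cur b then
    altLoop b (cur - b) (segs ++ [cur])
  else segs
termination_by (PySem.Int.floordiv cur b).toNat
decreasing_by
  have hb : b ≠ 0 := by
    intro h0
    rw [h0] at h
    have hz : PySem.Int.floordiv cur 0 = 0 := Int.fdiv_zero cur
    omega
  have hstep : PySem.Int.floordiv (cur - b) b = PySem.Int.floordiv cur b - 1 := by
    have h1 := Int.add_mul_fdiv_right cur (-1) hb
    show Int.fdiv _ _ = Int.fdiv _ _ - 1
    simpa [sub_eq_add_neg] using h1
  omega

def create_autoregressive_segments_py_alt (total_frames : Int) (base_chunk_frames : Int) : List Int :=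
  let segments := altLoop base_chunk_frames total_frames []
  let segments := if segments = [] ∧ 0 < total_frames then segments ++ [total_frames] else segments
  let segments := segments ++ [0]
  segments.reverse

-- ===== PRECONDITION & SPEC =====
-- Pre_ excludes exactly base_chunk_frames = 0, where A raises ZeroDivisionError (B does too).
def Pre_create_autoregressive_segments_py (total_frames : Int) (base_chunk_frames : Int) : Prop :=
  base_chunk_frames ≠ 0
instance (total_frames : Int) (base_chunk_frames : Int) : Decidable (Pre_create_autoregressive_segments_py total_frames base_chunk_frames) := by unfold Pre_create_autoregressive_segments_py; infer_instance
def pvWitness_create_autoregressive_segments_py : Int × Int := (23, 8)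

def Spec_create_autoregressive_segments_py (total_frames : Int) (base_chunk_frames : Int) (out : List Int) : Prop := out = create_autoregressive_segments_py_alt total_frames base_chunk_frames
instance (total_frames : Int) (base_chunk_frames : Int) (out : List Int) : Decidable (Spec_create_autoregressive_segments_py total_frames base_chunk_frames out) := by unfold Spec_create_autoregressive_segments_py; infer_instance

-- ===== CLAIM (what is proved, stated in full; the proofs are below) =====
def Claim_equal_create_autoregressive_segments_py : Prop := ∀ (total_frames : Int) (base_chunk_frames : Int), Dom_create_autoregressive_segments_py total_frames base_chunk_frames → Pre_create_autoregressive_segments_py total_frames base_chunk_frames → Spec_create_autoregressive_segments_py total_frames base_chunk_frames (create_autoregressive_segments_py total_frames base_chunk_frames)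

-- ===== LEMMAS AND PROOFS =====

lemma floordiv_sub_self (a b : Int) (hb : b ≠ 0) :
    PySem.Int.floordiv (a - b) b = PySem.Int.floordiv a b - 1 := by
  have h1 := Int.add_mul_fdiv_right a (-1) hb
  show Int.fdiv _ _ = Int.fdiv _ _ - 1
  simpa [sub_eq_add_neg] using h1

-- A's loop, after pyRange 0 q 1 is rewritten to a Nat range, computes 0 followed by the
-- progression r + (k+1)*b.
lemma loopA_eq (b r : Int) : ∀ (n : Nat),
    (List.range n).foldl (fun acc (k : Nat) =>
      let cur := (PySem.List.pyGet? acc (-1)).getD 0 + b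
      let cur := if ((0 : Int) + (k : Int)) == 0 then cur + r else cur
      acc ++ [cur]) [0]
    = 0 :: (List.range n).map (fun (k : Nat) => r + ((k : Int) + 1) * b) := by
  intro n
  induction n with
  | zero => simp
  | succ m ih =>
    rw [List.range_succ, List.foldl_append, ih]
    simp only [List.foldl_cons, List.foldl_nil]
    cases m with
    | zero =>
      simp [PySem.List.pyGet?_neg_one]
      ring
    | succ p =>
      have hsplit : (0 : Int) :: (List.range (p + 1)).map (fun (k : Nat) => r + ((k : Int) + 1) * b)
          = ((0 : Int) :: (List.range p).map (fun (k : Nat) => r + ((k : Int) + 1) * b))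
            ++ [r + ((p : Int) + 1) * b] := by
        rw [List.range_succ]; simp
      have hlast : (PySem.List.pyGet? ((0 : Int) :: (List.range (p + 1)).map
          (fun (k : Nat) => r + ((k : Int) + 1) * b)) (-1)).getD 0 = r + ((p : Int) + 1) * b := by
        rw [PySem.List.pyGet?_neg_one, hsplit, List.getLast?_concat]
        rfl
      simp only [hlast]
      rw [if_neg (by simp; omega)]
      simp only [List.map_append, List.map_cons, List.map_nil, List.cons_append,
        List.append_assoc, List.nil_append, List.cons.injEq, List.append_cancel_left_eq,
        true_and]
      push_cast
      simp
      ring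

-- B's while loop appends the descending progression cur - k*b, one element per full chunk.
lemma altLoop_eq (b : Int) : ∀ (n : Nat) (cur : Int) (segs : List Int),
    PySem.Int.floordiv cur b = n →
    altLoop b cur segs = segs ++ (List.range n).map (fun (k : Nat) => cur - (k : Int) * b) := by
  intro n
  induction n with
  | zero =>
    intro cur segs h
    rw [altLoop, dif_neg (by omega)]
    simp
  | succ m ih =>
    intro cur segs h
    have hb : b ≠ 0 := by
      intro h0
      rw [h0] at h
      have : PySem.Int.floordiv cur 0 = 0 := by
        show Int.fdiv cur 0 = 0
        exact Int.fdiv_zero cur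
      omega
    rw [altLoop, dif_pos (by omega)]
    rw [ih (cur - b) (segs ++ [cur]) (by rw [floordiv_sub_self cur b hb]; omega)]
    rw [List.append_assoc]
    congr 1
    rw [List.range_succ_eq_map]
    simp only [List.map_cons, List.map_map, Nat.cast_zero, zero_mul, sub_zero,
      List.singleton_append, List.cons.injEq, true_and]
    apply List.map_congr_left
    intro k _
    simp only [Function.comp_apply]
    push_cast
    ring

-- the two progressions are reverses of each other
lemma progressions_reverse (b r q : Int) (n : Nat) (hn : (n : Int) = q) (ht : q * b + r = q * b + r) :
    (List.range n).map (fun (k : Nat) => r + ((k : Int) + 1) * b)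
      = ((List.range n).map (fun (k : Nat) => (q * b + r) - (k : Int) * b)).reverse := by
  apply List.ext_getElem
  · simp
  · intro j h1 h2
    have hj : j < n := by simpa using h1
    rw [List.getElem_reverse]
    simp only [List.getElem_map, List.getElem_range]
    have hlen : (List.range n).length = n := List.length_range ..
    have hcast : ((n - 1 - j : Nat) : Int) = (n : Int) - 1 - (j : Int) := by
      have : 1 ≤ n := by omega
      omega
    simp only [List.length_map, List.length_range] at *
    rw [hcast, hn]
    ring

-- ===== VERDICT (by name: the statement is the Claim_ definition above) =====
theorem create_autoregressive_segments_py_spec : Claim_equal_create_autoregressive_segments_py := by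
  intro t b _hdom hb
  unfold Spec_create_autoregressive_segments_py
  unfold create_autoregressive_segments_py create_autoregressive_segments_py_alt
  set r := PySem.Int.mod t b with hr
  set q := PySem.Int.floordiv t b with hq
  have hqt : q * b + r = t := PySem.Int.floordiv_mul_add_mod t b
  simp only []
  rw [PySem.List.pyRange_one, List.foldl_map, sub_zero, loopA_eq b r q.toNat]
  by_cases hq1 : 1 ≤ q
  · -- at least one full chunk: both lists end at t, A's guard does not fire
    have hn : ((q.toNat : Nat) : Int) = q := by omega
    rw [altLoop_eq b q.toNat t [] (by omega)]
    have hne : (List.range q.toNat).map (fun (k : Nat) => t - (k : Int) * b) ≠ [] := by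
      simp; omega
    rw [List.nil_append]
    have hgB : ¬ ((List.range q.toNat).map (fun (k : Nat) => t - (k : Int) * b) = [] ∧ 0 < t) :=
      fun hc => hne hc.1
    -- A's last element is r + q*b = t, so the guard is false
    have hlastA : (PySem.List.pyGet? ((0 : Int) :: (List.range q.toNat).map
        (fun (k : Nat) => r + ((k : Int) + 1) * b)) (-1)).getD 0 = t := by
      rw [PySem.List.pyGet?_neg_one]
      obtain ⟨m, hm⟩ : ∃ m, q.toNat = m + 1 := ⟨q.toNat - 1, by omega⟩
      rw [hm, List.range_succ]
      simp only [List.map_append, List.map_cons, List.map_nil]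
      rw [← List.cons_append, List.getLast?_concat, Option.getD_some]
      have hmq : ((m : Int) + 1) = q := by omega
      rw [hmq]
      omega
    have hgA : ¬ ((PySem.List.pyGet? ((0 : Int) :: (List.range q.toNat).map
        (fun (k : Nat) => r + ((k : Int) + 1) * b)) (-1)).getD 0 < t) := by
      rw [hlastA]; omega
    rw [if_neg hgA, if_neg hgB]
    have hprog : (List.range q.toNat).map (fun (k : Nat) => t - (k : Int) * b)
        = ((List.range q.toNat).map (fun (k : Nat) => r + ((k : Int) + 1) * b)).reverse := by
      rw [← hqt, progressions_reverse b r q q.toNat hn rfl]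
      simp
    rw [hprog]
    simp
  · -- no full chunk: A's loop is empty, B's loop exits at once
    have h0 : q.toNat = 0 := by omega
    rw [altLoop, dif_neg (by omega), h0]
    simp only [List.range_zero, List.map_nil, List.append_nil, List.nil_append]
    have hA : (PySem.List.pyGet? [(0 : Int)] (-1)).getD 0 = 0 := by
      simp [PySem.List.pyGet?_neg_one]
    rw [hA]
    by_cases ht : 0 < t
    · rw [if_pos ht]; simp [ht]
    · rw [if_neg ht]; simp [ht]
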